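-- pv_equiv track=rewrite | github.com/AndrewLane/advent_of_code_2024 | day7/puzzle1.py | can_multiplication_or_addition_operations_work
-- ===== SOURCE A (Python) =====
-- def can_multiplication_or_addition_operations_work(result, numbers):
--     if len(numbers) == 1:
--         return numbers[0] == result
--
--     first_number = numbers[0]
--     can_multiplication_work = result % first_number == 0
--     return can_multiplication_or_addition_operations_work(
--         result - first_number, numbers[1:]
--     ) or (
--         can_multiplication_work
--         and can_multiplication_or_addition_operations_work(
--             int(result / first_number), numbers[1:]
--         )
--     )
-- ===== SOURCE B (Python) =====
-- def can_multiplication_or_addition_operations_work(result, numbers):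
--     # Forward level-by-level search: maintain the list of all intermediate
--     # values reachable from `result`, then test the last number at the end.
--     vals = [result]
--     for x in numbers[:-1]:
--         nxt = []
--         for r in vals:
--             nxt.append(r - x)
--             if r % x == 0:
--                 nxt.append(r // x)
--         vals = nxt
--     return numbers[-1] in vals
-- ===== Notes on version B (the rewrite author's own statement) =====
-- stated objective: faster
-- what changed: Replaced the left-first boolean DFS recursion by an iterative level-by-level (breadth-first) fold that maintains the list of all reachable intermediate values and finishes with one membership test against the last number, avoiding per-node Python function-call recursion.
import Mathlib
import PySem

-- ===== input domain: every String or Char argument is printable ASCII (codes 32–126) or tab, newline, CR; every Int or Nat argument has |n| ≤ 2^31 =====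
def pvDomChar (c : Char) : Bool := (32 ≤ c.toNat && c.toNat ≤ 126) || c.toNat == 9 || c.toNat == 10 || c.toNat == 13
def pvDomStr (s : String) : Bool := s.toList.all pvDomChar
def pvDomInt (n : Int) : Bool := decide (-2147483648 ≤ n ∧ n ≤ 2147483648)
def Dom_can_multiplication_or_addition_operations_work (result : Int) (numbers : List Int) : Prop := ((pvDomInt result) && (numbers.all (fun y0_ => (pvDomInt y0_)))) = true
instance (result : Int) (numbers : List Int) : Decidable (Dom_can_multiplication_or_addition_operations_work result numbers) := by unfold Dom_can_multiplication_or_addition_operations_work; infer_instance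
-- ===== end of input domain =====

-- B replaces the left-first boolean DFS recursion by an iterative level-by-level
-- fold over the reachable intermediate values, finished by one membership test (alternative decomposition).


-- ===== PORT A =====
-- `int(result / first_number)` is a truncating exact division; it is only evaluated
-- under `result % first_number == 0`, where truncation and Python's floor division
-- coincide (the quotient is exact), so it is ported as PySem.Int.floordiv.
def can_multiplication_or_addition_operations_work (result : Int) (numbers : List Int) : Bool :=
  match numbers with
  | [] => false  -- Python raises IndexError here; excluded by Pre_
  | [x] => x == result
  | x :: y :: rest =>
      let canMult := PySem.Int.mod result x == 0
      can_multiplication_or_addition_operations_work (result - x) (y :: rest) ||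
        (canMult && can_multiplication_or_addition_operations_work (PySem.Int.floordiv result x) (y :: rest))

-- ===== PORT B =====
-- inner loop of Source B: nxt.append(r - x); if r % x == 0: nxt.append(r // x)
def pvStep (x : Int) (vals : List Int) : List Int :=
  vals.foldl (fun acc r => acc ++ ((r - x) :: (if PySem.Int.mod r x == 0 then [PySem.Int.floordiv r x] else []))) []

def can_multiplication_or_addition_operations_work_alt (result : Int) (numbers : List Int) : Bool :=
  match numbers.getLast? with
  | none => false  -- numbers[-1] raises IndexError in Python; excluded by Pre_
  | some last => ((numbers.dropLast).foldl (fun vals x => pvStep x vals) [result]).contains last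

-- ===== PRECONDITION & SPEC =====
-- Pre_ excludes exactly the raising inputs: numbers == [] (IndexError) and a 0 in any
-- non-last position (ZeroDivisionError from `result % first_number`); both A and B raise there.
def Pre_can_multiplication_or_addition_operations_work (result : Int) (numbers : List Int) : Prop :=
  numbers ≠ [] ∧ (0 : Int) ∉ numbers.dropLast
instance (result : Int) (numbers : List Int) : Decidable (Pre_can_multiplication_or_addition_operations_work result numbers) := by unfold Pre_can_multiplication_or_addition_operations_work; infer_instance

def pvWitness_can_multiplication_or_addition_operations_work : Int × List Int := (6, [2, 3])

def Spec_can_multiplication_or_addition_operations_work (result : Int) (numbers : List Int) (out : Bool) : Prop := out = can_multiplication_or_addition_operations_work_alt result numbers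
instance (result : Int) (numbers : List Int) (out : Bool) : Decidable (Spec_can_multiplication_or_addition_operations_work result numbers out) := by unfold Spec_can_multiplication_or_addition_operations_work; infer_instance

-- ===== CLAIM (what is proved, stated in full; the proofs are below) =====
def Claim_equal_can_multiplication_or_addition_operations_work : Prop := ∀ (result : Int) (numbers : List Int), Dom_can_multiplication_or_addition_operations_work result numbers → Pre_can_multiplication_or_addition_operations_work result numbers → Spec_can_multiplication_or_addition_operations_work result numbers (can_multiplication_or_addition_operations_work result numbers)

-- ===== LEMMAS AND PROOFS =====

theorem pvStep_eq_flatMap (x : Int) (vals : List Int) :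
    pvStep x vals
      = vals.flatMap (fun r => (r - x) :: (if PySem.Int.mod r x == 0 then [PySem.Int.floordiv r x] else [])) := by
  simpa [pvStep] using
    PySem.List.foldl_append_eq_flatMap
      (fun r => (r - x) :: (if PySem.Int.mod r x == 0 then [PySem.Int.floordiv r x] else [])) vals []

theorem pv_key (xs : List Int) (last : Int) (vals : List Int) :
    (xs.foldl (fun vals x => pvStep x vals) vals).contains last
      = vals.any (fun r => can_multiplication_or_addition_operations_work r (xs ++ [last])) := by
  induction xs generalizing vals with
  | nil =>
      simp [can_multiplication_or_addition_operations_work, List.any_beq]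
  | cons x xs ih =>
      rw [List.foldl_cons, ih, pvStep_eq_flatMap, List.any_flatMap]
      refine congrArg (List.any vals) (funext fun r => ?_)
      cases h : xs ++ [last] with
      | nil => exact absurd h (by simp)
      | cons y t =>
          rw [List.cons_append, h,
            show can_multiplication_or_addition_operations_work r (x :: y :: t)
              = (can_multiplication_or_addition_operations_work (r - x) (y :: t) ||
                  ((PySem.Int.mod r x == 0) &&
                    can_multiplication_or_addition_operations_work (PySem.Int.floordiv r x) (y :: t)))
              from rfl]
          by_cases hm : PySem.Int.mod r x = 0 <;> simp [hm]

theorem can_multiplication_or_addition_operations_work_spec : Claim_equal_can_multiplication_or_addition_operations_work := by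
  intro result numbers _ _
  unfold Spec_can_multiplication_or_addition_operations_work
  cases numbers with
  | nil => rfl
  | cons n ns =>
      have hne : n :: ns ≠ [] := by simp
      have hlast : (n :: ns).getLast? = some ((n :: ns).getLast hne) :=
        List.getLast?_eq_some_getLast hne
      rw [show can_multiplication_or_addition_operations_work_alt result (n :: ns)
            = (((n :: ns).dropLast).foldl (fun vals x => pvStep x vals) [result]).contains
                ((n :: ns).getLast hne) from by
        unfold can_multiplication_or_addition_operations_work_alt; rw [hlast]]
      rw [pv_key, List.dropLast_concat_getLast hne]
      simp

-- ===== VERDICT (by name: the statement is the Claim_ definition above) =====
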